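-- pv_equiv track=rewrite | github.com/l1t-w1n/Algo | tp1 algo.py | nbRankRecursive
-- ===== SOURCE A (Python) =====
-- def nbRankRecursive(u,o):
--     if u==0:
--         return 0
--     elif o==1:
--         return u%10
--     else:
--         o=o-1
--         u=u//10
--         return nbRankRecursive(u,o)
-- ===== SOURCE B (Python) =====
-- def _ndigits(n):
--     d = 1
--     while n >= 10:
--         n //= 10
--         d += 1
--     return d
--
-- def nbRankRecursive(u, o):
--     if o < 1:
--         return 0
--     return u // 10 ** min(o - 1, _ndigits(abs(u))) % 10
-- ===== Notes on version B (the rewrite author's own statement) =====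
-- stated objective: alternative
-- what changed: Replaced the o-step recursive digit-peeling by a single closed-form division u // 10**min(o-1, ndigits(|u|)) % 10, where the exponent is capped by the digit count of |u| so the power stays small.
-- outside the precondition, e.g. on nbRankRecursive(-5, 950): A returns 9, B returns 9
import Mathlib
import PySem

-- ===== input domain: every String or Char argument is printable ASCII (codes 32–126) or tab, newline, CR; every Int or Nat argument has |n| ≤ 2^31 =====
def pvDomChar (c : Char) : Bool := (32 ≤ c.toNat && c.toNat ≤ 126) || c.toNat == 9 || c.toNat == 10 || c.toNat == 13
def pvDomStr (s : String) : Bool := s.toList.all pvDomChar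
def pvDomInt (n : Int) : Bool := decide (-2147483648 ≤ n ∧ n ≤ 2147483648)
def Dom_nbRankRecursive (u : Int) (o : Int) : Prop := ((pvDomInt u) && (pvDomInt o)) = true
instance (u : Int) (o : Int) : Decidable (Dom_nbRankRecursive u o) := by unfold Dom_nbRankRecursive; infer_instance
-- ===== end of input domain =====

-- ===== PORT A =====
-- B replaces the o-step recursive digit peeling by one capped closed-form division.
-- Fuel-based transliteration of A's recursion; fuel o.toNat + u.natAbs + 1 is enough
-- whenever the Python recursion terminates (proved below), so the guard only makes it total.
def nbRankRecFuel (fuel : Nat) (u : Int) (o : Int) : Int :=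
  match fuel with
  | 0 => 0
  | fuel + 1 =>
    if u = 0 then 0
    else if o = 1 then PySem.Int.mod u 10
    else nbRankRecFuel fuel (PySem.Int.floordiv u 10) (o - 1)

def nbRankRecursive (u : Int) (o : Int) : Int :=
  nbRankRecFuel (o.toNat + u.natAbs + 1) u o

-- ===== PORT B =====
-- port of Source B's _ndigits: while n >= 10: n //= 10; d += 1
def pvNdigits (n : Nat) : Nat :=
  if n < 10 then 1 else pvNdigits (n / 10) + 1
decreasing_by exact Nat.div_lt_self (by omega) (by omega)

def nbRankRecursive_alt (u : Int) (o : Int) : Int :=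
  if o < 1 then 0
  else PySem.Int.mod (PySem.Int.floordiv u (10 ^ min (o - 1).toNat (pvNdigits u.natAbs))) 10

-- ===== PRECONDITION & SPEC =====
-- Pre_ excludes negative u with o <= 0, where A recurses forever (u//10 sticks at -1), and
-- negative u with o > 900, where A's recursion depth o-1 approaches/exceeds Python's default
-- recursion limit (~1000) and A raises RecursionError; the margin 900 < o <= ~995 drops a few
-- inputs where A still returns (B returns the same digit there, see the cited example).
def Pre_nbRankRecursive (u : Int) (o : Int) : Prop := 0 ≤ u ∨ (1 ≤ o ∧ o ≤ 900)
instance (u : Int) (o : Int) : Decidable (Pre_nbRankRecursive u o) := by unfold Pre_nbRankRecursive; infer_instance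
def pvWitness_nbRankRecursive : Int × Int := (4635, 2)

def Spec_nbRankRecursive (u : Int) (o : Int) (out : Int) : Prop := out = nbRankRecursive_alt u o
instance (u : Int) (o : Int) (out : Int) : Decidable (Spec_nbRankRecursive u o out) := by unfold Spec_nbRankRecursive; infer_instance

-- ===== CLAIM (what is proved, stated in full; the proofs are below) =====
def Claim_equal_nbRankRecursive : Prop := ∀ (u : Int) (o : Int), Dom_nbRankRecursive u o → Pre_nbRankRecursive u o → Spec_nbRankRecursive u o (nbRankRecursive u o)

-- ===== LEMMAS AND PROOFS =====

theorem pvNdigits_bracket (n : Nat) (hn : 1 ≤ n) :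
    10 ^ (pvNdigits n - 1) ≤ n ∧ n < 10 ^ pvNdigits n := by
  fun_induction pvNdigits n with
  | case1 n h => simpa using ⟨hn, h⟩
  | case2 n h ih =>
    have hd := ih (by omega)
    have h1 : 1 ≤ pvNdigits (n / 10) := by
      unfold pvNdigits; split <;> omega
    constructor
    · have : 10 ^ (pvNdigits (n/10) + 1 - 1) = 10 * 10 ^ (pvNdigits (n/10) - 1) := by
        rw [Nat.add_sub_cancel, ← pow_succ']
        congr 1; omega
      rw [this]; omega
    · have : 10 ^ (pvNdigits (n/10) + 1) = 10 * 10 ^ (pvNdigits (n/10)) := by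
        rw [← pow_succ']
      rw [this]; omega

theorem nbRankRecFuel_closed (fuel : Nat) (u o : Int) (ho : 1 ≤ o) (hf : o.toNat ≤ fuel) :
    nbRankRecFuel fuel u o = PySem.Int.mod (PySem.Int.floordiv u (10 ^ (o - 1).toNat)) 10 := by
  induction fuel generalizing u o with
  | zero => omega
  | succ fuel ih =>
    have hp : (0:Int) < 10 ^ (o - 1).toNat := by positivity
    simp only [nbRankRecFuel]
    by_cases hu : u = 0
    · simp [hu, PySem.Int.floordiv, PySem.Int.mod]
    · by_cases ho1 : o = 1
      · simp [hu, ho1]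
      · simp only [hu, ho1, if_false]
        rw [ih (PySem.Int.floordiv u 10) (o - 1) (by omega) (by omega)]
        congr 1
        rw [PySem.Int.floordiv_eq_ediv_of_pos (by norm_num : (0:Int) < 10),
            PySem.Int.floordiv_eq_ediv_of_pos (by positivity : (0:Int) < 10 ^ (o - 1 - 1).toNat),
            PySem.Int.floordiv_eq_ediv_of_pos hp,
            Int.ediv_ediv_of_nonneg (by norm_num : (0:Int) ≤ 10)]
        congr 1
        have h1 : (o - 1).toNat = (o - 1 - 1).toNat + 1 := by omega
        rw [h1, pow_succ']

theorem nbRankRecFuel_nonpos (fuel : Nat) (u o : Int) (hu : 0 ≤ u) (ho : o ≤ 0)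
    (hf : u.natAbs < fuel) : nbRankRecFuel fuel u o = 0 := by
  induction fuel generalizing u o with
  | zero => rfl
  | succ fuel ih =>
    simp only [nbRankRecFuel]
    by_cases h0 : u = 0
    · simp [h0]
    · have ho1 : o ≠ 1 := by omega
      simp only [h0, ho1, if_false]
      have hdiv : PySem.Int.floordiv u 10 = u / 10 :=
        PySem.Int.floordiv_eq_ediv_of_pos (by norm_num)
      have h3 := Int.mul_ediv_add_emod u 10
      have h4 := Int.emod_nonneg u (by norm_num : (10:Int) ≠ 0)
      have h5 := Int.emod_lt_of_pos u (by norm_num : (0:Int) < 10)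
      apply ih
      · rw [hdiv]; omega
      · omega
      · rw [hdiv]; omega

theorem floordiv_pow_cap (u : Int) (k : Nat) :
    PySem.Int.floordiv u (10 ^ k) = PySem.Int.floordiv u (10 ^ min k (pvNdigits u.natAbs)) := by
  by_cases hk : k ≤ pvNdigits u.natAbs
  · rw [min_eq_left hk]
  · rw [min_eq_right (by omega)]
    set d := pvNdigits u.natAbs with hd
    by_cases h0 : u = 0
    · simp [h0, PySem.Int.floordiv]
    · have hb := pvNdigits_bracket u.natAbs (by omega)
      rw [← hd] at hb
      have habs : (u.natAbs : Int) < 10 ^ d := by exact_mod_cast hb.2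
      have hdk : (10:Int) ^ d ≤ 10 ^ k := by
        apply pow_le_pow_right₀ (by norm_num) (by omega)
      rcases lt_or_gt_of_ne h0 with hneg | hpos
      · -- u < 0 : both are -1
        have e1 : PySem.Int.floordiv u (10 ^ k) = -1 := by
          rw [PySem.Int.floordiv_eq_iff_of_pos (by positivity)]
          constructor <;> [omega; omega]
        have e2 : PySem.Int.floordiv u (10 ^ d) = -1 := by
          rw [PySem.Int.floordiv_eq_iff_of_pos (by positivity)]
          constructor <;> [omega; omega]
        rw [e1, e2]
      · -- u > 0 : both are 0
        have e1 : PySem.Int.floordiv u (10 ^ k) = 0 := by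
          rw [PySem.Int.floordiv_eq_iff_of_pos (by positivity)]
          constructor <;> [omega; omega]
        have e2 : PySem.Int.floordiv u (10 ^ d) = 0 := by
          rw [PySem.Int.floordiv_eq_iff_of_pos (by positivity)]
          constructor <;> [omega; omega]
        rw [e1, e2]

-- ===== VERDICT (by name: the statement is the Claim_ definition above) =====
theorem nbRankRecursive_spec : Claim_equal_nbRankRecursive := by
  intro u o _ hpre
  unfold Spec_nbRankRecursive nbRankRecursive nbRankRecursive_alt
  by_cases ho : o < 1
  · have hu : 0 ≤ u := by
      rcases hpre with h | h
      · exact h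
      · omega
    rw [nbRankRecFuel_nonpos _ u o hu (by omega) (by omega), if_pos ho]
  · rw [nbRankRecFuel_closed _ u o (by omega) (by omega), floordiv_pow_cap, if_neg ho]
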